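-- pv_equiv track=rewrite | github.com/Design-By-Fundamentals-UKAEA/__U.P_X.O__. | tutorials/uioriMCGS.py | cellname_to_rowcol
-- ===== SOURCE A (Python) =====
-- def cellname_to_rowcol(cell_name):
--     col_name = ''.join(filter(str.isalpha, cell_name))
--     row_name = ''.join(filter(str.isdigit, cell_name))
--
--     col_idx = 0
--     for i, char in enumerate(reversed(col_name)):
--         col_idx += (ord(char) - ord('A') + 1) * (26 ** i)
--     row_idx = int(row_name) - 1  # Convert 1-based index to 0-based index
--
--     return row_idx, col_idx - 1  # Convert 1-based index to 0-based index
-- ===== SOURCE B (Python) =====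
-- def cellname_to_rowcol(cell_name):
--     col = 0
--     digits = []
--     for ch in cell_name:
--         if ch.isalpha():
--             col = col * 26 + (ord(ch) - ord('A') + 1)
--         elif ch.isdigit():
--             digits.append(ch)
--     return int(''.join(digits)) - 1, col - 1
-- ===== Notes on version B (the rewrite author's own statement) =====
-- stated objective: alternative
-- what changed: Replaces A's two filter passes plus a reversed/enumerate power-sum with one single pass over the string that maintains a pair accumulator: a Horner column value (col = col*26 + letter) and the collected digit characters.
import Mathlib
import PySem

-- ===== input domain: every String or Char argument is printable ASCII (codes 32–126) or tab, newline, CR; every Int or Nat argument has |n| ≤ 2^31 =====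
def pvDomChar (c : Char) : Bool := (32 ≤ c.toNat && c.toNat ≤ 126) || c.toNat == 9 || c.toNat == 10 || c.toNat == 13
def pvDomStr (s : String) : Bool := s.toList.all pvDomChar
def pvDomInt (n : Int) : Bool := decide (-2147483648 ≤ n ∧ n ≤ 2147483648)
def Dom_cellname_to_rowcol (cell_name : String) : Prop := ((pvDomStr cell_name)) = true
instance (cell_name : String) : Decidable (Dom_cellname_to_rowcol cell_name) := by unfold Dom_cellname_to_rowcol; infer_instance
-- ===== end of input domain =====

-- B replaces A's two filter passes plus reversed/enumerate power-sum with ONE pass over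
-- the string carrying a pair accumulator (Horner column value, collected digit chars).


-- ===== PORT A =====
-- int(row_name): PySem.Int.ofChars?; none = ValueError, excluded by Pre_ (.getD 0 is never
-- reached inside Pre_).  26 ** i: the enumerate index is nonneg, exponent taken as .toNat.
def cellname_to_rowcol (cell_name : String) : Int × Int :=
  let col_name := cell_name.toList.filter PySem.Chars.isalpha
  let row_name := cell_name.toList.filter PySem.Chars.isdigit
  let col_idx : Int :=
    (PySem.List.enumerate col_name.reverse).foldl
      (fun acc p => acc + ((p.2.toNat : Int) - 65 + 1) * (26 ^ p.1.toNat)) 0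
  let row_idx : Int := (PySem.Int.ofChars? row_name).getD 0 - 1
  (row_idx, col_idx - 1)

-- ===== PORT B =====
-- one loop over the characters; state = (Horner column accumulator, digit chars so far)
def cellname_to_rowcol_alt (cell_name : String) : Int × Int :=
  let st := cell_name.toList.foldl
    (fun (st : Int × List Char) ch =>
      if PySem.Chars.isalpha ch then (st.1 * 26 + ((ch.toNat : Int) - 65 + 1), st.2)
      else if PySem.Chars.isdigit ch then (st.1, st.2 ++ [ch])
      else st)
    (0, [])
  ((PySem.Int.ofChars? st.2).getD 0 - 1, st.1 - 1)

-- ===== PRECONDITION & SPEC =====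
-- A raises ValueError when the string contains no digit character (int of an empty digit string); those inputs are excluded; B raises there too.
def Pre_cellname_to_rowcol (cell_name : String) : Prop :=
  cell_name.toList.any PySem.Chars.isdigit = true
instance (cell_name : String) : Decidable (Pre_cellname_to_rowcol cell_name) := by unfold Pre_cellname_to_rowcol; infer_instance
def pvWitness_cellname_to_rowcol : String := "B7"

def Spec_cellname_to_rowcol (cell_name : String) (out : Int × Int) : Prop := out = cellname_to_rowcol_alt cell_name
instance (cell_name : String) (out : Int × Int) : Decidable (Spec_cellname_to_rowcol cell_name out) := by unfold Spec_cellname_to_rowcol; infer_instance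

-- ===== CLAIM (what is proved, stated in full; the proofs are below) =====
def Claim_equal_cellname_to_rowcol : Prop := ∀ (cell_name : String), Dom_cellname_to_rowcol cell_name → Pre_cellname_to_rowcol cell_name → Spec_cellname_to_rowcol cell_name (cellname_to_rowcol cell_name)

-- ===== LEMMAS AND PROOFS =====

-- the value a single letter contributes
def pvLetterVal (c : Char) : Int := (c.toNat : Int) - 65 + 1

-- the little-endian base-26 value, as A's loop computes it over the reversed letters
def pvLE : List Char → Int
  | [] => 0
  | c :: t => pvLetterVal c + 26 * pvLE t

lemma pvA_enum (r : List Char) : ∀ (s : Nat) (a : Int),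
    (PySem.List.enumerate r (s : Int)).foldl
      (fun acc p => acc + ((p.2.toNat : Int) - 65 + 1) * (26 ^ p.1.toNat)) a
      = a + (26 : Int) ^ s * pvLE r := by
  induction r with
  | nil => intro s a; simp [PySem.List.enumerate_nil, pvLE]
  | cons c t ih =>
      intro s a
      have hs : ((s : Int) + 1) = ((s + 1 : Nat) : Int) := by push_cast; ring
      rw [PySem.List.enumerate_cons, List.foldl_cons, hs, ih (s + 1)]
      simp [pvLE, pvLetterVal, pow_succ]
      ring

lemma pvLE_append (xs : List Char) (c : Char) :
    pvLE (xs ++ [c]) = pvLE xs + 26 ^ xs.length * pvLetterVal c := by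
  induction xs with
  | nil => simp [pvLE]
  | cons d t ih => simp [pvLE, ih, pow_succ]; ring

lemma pvB_horner (l : List Char) : ∀ (a : Int),
    l.foldl (fun acc c => acc * 26 + ((c.toNat : Int) - 65 + 1)) a
      = a * 26 ^ l.length + pvLE l.reverse := by
  induction l with
  | nil => intro a; simp [pvLE]
  | cons c t ih =>
      intro a
      rw [List.foldl_cons, ih, List.reverse_cons, pvLE_append]
      simp [pvLetterVal, pow_succ, List.length_reverse]
      ring

-- an alphabetic character is never a digit
lemma pv_alpha_not_digit (c : Char) (h : PySem.Chars.isalpha c = true) :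
    PySem.Chars.isdigit c = false := by
  have e0 : ('0' : Char).val.toNat = 48 := by decide
  have e9 : ('9' : Char).val.toNat = 57 := by decide
  have eA : ('A' : Char).val.toNat = 65 := by decide
  have eZ : ('Z' : Char).val.toNat = 90 := by decide
  have ea : ('a' : Char).val.toNat = 97 := by decide
  have ez : ('z' : Char).val.toNat = 122 := by decide
  simp only [PySem.Chars.isalpha, PySem.Chars.isupper, PySem.Chars.islower,
    Bool.or_eq_true, Bool.and_eq_true, decide_eq_true_eq, Char.le_def,
    UInt32.le_iff_toNat_le, eA, eZ, ea, ez] at h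
  simp only [PySem.Chars.isdigit, Bool.and_eq_false_iff, decide_eq_false_iff_not,
    Char.le_def, UInt32.le_iff_toNat_le, e0, e9]
  omega

-- B's single pass splits into the Horner column value and the filtered digits
lemma pvB_pair (l : List Char) : ∀ (a : Int) (ds : List Char),
    l.foldl
      (fun (st : Int × List Char) ch =>
        if PySem.Chars.isalpha ch then (st.1 * 26 + ((ch.toNat : Int) - 65 + 1), st.2)
        else if PySem.Chars.isdigit ch then (st.1, st.2 ++ [ch])
        else st)
      (a, ds)
      = ((l.filter PySem.Chars.isalpha).foldl
           (fun acc c => acc * 26 + ((c.toNat : Int) - 65 + 1)) a,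
         ds ++ l.filter PySem.Chars.isdigit) := by
  induction l with
  | nil => intro a ds; simp
  | cons c t ih =>
      intro a ds
      by_cases hA : PySem.Chars.isalpha c = true
      · simp [List.foldl_cons, hA, pv_alpha_not_digit c hA, ih]
      · by_cases hD : PySem.Chars.isdigit c = true
        · simp [List.foldl_cons, hA, hD, ih]
        · simp [List.foldl_cons, hA, hD, ih]

lemma pv_col_eq (l : List Char) :
    (PySem.List.enumerate l.reverse).foldl
      (fun acc p => acc + ((p.2.toNat : Int) - 65 + 1) * (26 ^ p.1.toNat)) 0
      = l.foldl (fun acc c => acc * 26 + ((c.toNat : Int) - 65 + 1)) 0 := by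
  have h0 := pvA_enum l.reverse 0 0
  have h1 := pvB_horner l 0
  simp only [Nat.cast_zero] at h0
  rw [h0, h1]
  simp

-- ===== VERDICT (by name: the statement is the Claim_ definition above) =====
theorem cellname_to_rowcol_spec : Claim_equal_cellname_to_rowcol := by
  intro cell_name _ _
  unfold Spec_cellname_to_rowcol cellname_to_rowcol cellname_to_rowcol_alt
  rw [pvB_pair]
  simp only [List.nil_append, pv_col_eq]
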